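-- pv_equiv track=rewrite | github.com/ilialecha/Programming_1 | Programming-exam/walker.py | walker
-- ===== SOURCE A (Python) =====
-- def walker(x, y, steps):
-- 	'''
-- 	>>> walker(4, 1, 'NEENWNWWS')
-- 	(3, 3)
-- 	>>> walker(3, 5, 'NESW')
-- 	(3, 5)
-- 	>>> walker(0, 4, 'SSSSEWEWNNNN')
-- 	(0, 4)
-- 	>>> walker(0, 0, 'SWSWNES')
-- 	(-1, -2)
-- 	>>> walker(6, 3, '')
-- 	(6, 3)
-- 	'''
--
-- 	for step in steps:
-- 		if step == "N":
-- 			y+=1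
-- 		elif step == "S":
-- 			y-=1
-- 		elif step == "E":
-- 			x+=1
-- 		elif step == "W":
-- 			x-=1
--
-- 	return (x,y)
-- ===== SOURCE B (Python) =====
-- def walker(x, y, steps):
--     # Count each direction once, then compute the displacement in closed form.
--     return (x + steps.count("E") - steps.count("W"),
--             y + steps.count("N") - steps.count("S"))
-- ===== Notes on version B (the rewrite author's own statement) =====
-- stated objective: idiomatic
-- what changed: Replaced the per-character branch-and-accumulate loop with four str.count tallies and a closed-form arithmetic result.
import Mathlib
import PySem

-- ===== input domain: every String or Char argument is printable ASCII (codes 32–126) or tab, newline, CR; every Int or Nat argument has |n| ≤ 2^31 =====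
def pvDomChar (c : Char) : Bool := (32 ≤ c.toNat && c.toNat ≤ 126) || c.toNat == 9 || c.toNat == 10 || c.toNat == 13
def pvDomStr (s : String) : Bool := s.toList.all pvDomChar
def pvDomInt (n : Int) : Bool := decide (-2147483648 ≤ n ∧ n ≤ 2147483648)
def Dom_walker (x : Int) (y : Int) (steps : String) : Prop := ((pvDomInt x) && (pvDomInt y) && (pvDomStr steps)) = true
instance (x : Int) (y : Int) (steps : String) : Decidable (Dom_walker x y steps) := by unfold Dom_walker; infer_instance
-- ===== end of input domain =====

-- B replaces A's per-character accumulation loop with four str.count tallies and closed-form arithmetic (idiomatic).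


-- ===== PORT A =====
-- for step in steps: if/elif chain updating (x, y), then return (x, y)
def walker (x : Int) (y : Int) (steps : String) : Int × Int :=
  let st := steps.toList.foldl
    (fun (p : Int × Int) step =>
      if step == 'N' then (p.1, p.2 + 1)
      else if step == 'S' then (p.1, p.2 - 1)
      else if step == 'E' then (p.1 + 1, p.2)
      else if step == 'W' then (p.1 - 1, p.2)
      else p)
    (x, y)
  (st.1, st.2)

-- ===== PORT B =====
-- count each direction once, closed-form displacement
def walker_alt (x : Int) (y : Int) (steps : String) : Int × Int :=
  (x + (PySem.Str.count steps "E" : Int) - (PySem.Str.count steps "W" : Int),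
   y + (PySem.Str.count steps "N" : Int) - (PySem.Str.count steps "S" : Int))

-- ===== PRECONDITION & SPEC =====
def Spec_walker (x : Int) (y : Int) (steps : String) (out : Int × Int) : Prop := out = walker_alt x y steps
instance (x : Int) (y : Int) (steps : String) (out : Int × Int) : Decidable (Spec_walker x y steps out) := by unfold Spec_walker; infer_instance

-- ===== CLAIM (what is proved, stated in full; the proofs are below) =====
def Claim_equal_walker : Prop := ∀ (x : Int) (y : Int) (steps : String), Dom_walker x y steps → Spec_walker x y steps (walker x y steps)

-- ===== LEMMAS AND PROOFS =====

-- Chars.count.go for a single-character needle is the plain list count.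
theorem pv_go_single (c : Char) (l : List Char) : ∀ (fuel acc : Nat), l.length ≤ fuel →
    PySem.Chars.count.go [c] fuel l acc = acc + l.count c := by
  induction l with
  | nil => intro fuel acc _; cases fuel <;> simp [PySem.Chars.count.go]
  | cons h t ih =>
    intro fuel acc hf
    cases fuel with
    | zero => simp at hf
    | succ f =>
      simp only [PySem.Chars.count.go]
      by_cases hc : h = c
      · subst hc
        simp [List.isPrefixOf, ih f (acc + 1) (by simpa using hf)]
        omega
      · simp [List.isPrefixOf, hc, ih f acc (by simpa using hf), Ne.symm hc]

-- str.count of a single-character string is the list count of that character.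
theorem pv_count_single (c : Char) (s : String) :
    PySem.Str.count s (String.ofList [c]) = s.toList.count c := by
  rw [PySem.Str.count_eq]
  have h1 : (String.ofList [c]).toList = [c] := by simp
  rw [h1]
  simp only [PySem.Chars.count, List.isEmpty_cons, if_false, Bool.false_eq_true]
  exact (pv_go_single c s.toList s.toList.length 0 le_rfl).trans (by simp)

-- A's fold expressed through the four character counts.
theorem pv_fold_counts (l : List Char) : ∀ (x y : Int),
    l.foldl
      (fun (p : Int × Int) step =>
        if step == 'N' then (p.1, p.2 + 1)
        else if step == 'S' then (p.1, p.2 - 1)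
        else if step == 'E' then (p.1 + 1, p.2)
        else if step == 'W' then (p.1 - 1, p.2)
        else p)
      (x, y)
    = (x + (l.count 'E' : Int) - (l.count 'W' : Int),
       y + (l.count 'N' : Int) - (l.count 'S' : Int)) := by
  induction l with
  | nil => intro x y; simp
  | cons h t ih =>
    intro x y
    simp only [List.foldl_cons, beq_iff_eq]
    split_ifs with h1 h2 h3 h4 <;> simp_all <;> omega

-- ===== VERDICT (by name: the statement is the Claim_ definition above) =====
theorem walker_spec : Claim_equal_walker := by
  intro x y steps _
  show walker x y steps = walker_alt x y steps
  unfold walker walker_alt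
  rw [pv_fold_counts]
  rw [show ("E" : String) = String.ofList ['E'] from rfl,
      show ("W" : String) = String.ofList ['W'] from rfl,
      show ("N" : String) = String.ofList ['N'] from rfl,
      show ("S" : String) = String.ofList ['S'] from rfl,
      pv_count_single, pv_count_single, pv_count_single, pv_count_single]
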